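-- pv_equiv track=rewrite | github.com/SimHongJae/Cryptocontest26 | solve_q7_z3_exact.py | apply_low_branch
-- ===== SOURCE A (Python) =====
-- def apply_low_branch(p_base: int, k_known: int, low_a: int, low_b: int) -> int:
--     p_low = p_base & ((1 << k_known) - 1)
--     for b in range(7):
--         idx = 80 + b
--         if idx < k_known:
--             if (low_a >> b) & 1:
--                 p_low |= 1 << idx
--             else:
--                 p_low &= ~(1 << idx)
--     for b in range(6):
--         idx = 150 + b
--         if idx < k_known:
--             if (low_b >> b) & 1:
--                 p_low |= 1 << idx
--             else:
--                 p_low &= ~(1 << idx)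
--     return p_low
-- ===== SOURCE B (Python) =====
-- def apply_low_branch(p_base: int, k_known: int, low_a: int, low_b: int) -> int:
--     def splice(p, s, n, v):
--         # replace bits [s, s+n) of p by the n lowest bits of v, arithmetically
--         return p % (1 << s) + (v % (1 << n)) * (1 << s) + p // (1 << (s + n)) * (1 << (s + n))
--     p = p_base % (1 << k_known)
--     na = max(0, min(7, k_known - 80))
--     nb = max(0, min(6, k_known - 150))
--     return splice(splice(p, 80, na, low_a), 150, nb, low_b)
-- ===== Notes on version B (the rewrite author's own statement) =====
-- stated objective: simpler
-- what changed: Both 13-iteration per-bit set/clear loops are replaced by two closed-form arithmetic splices (mod/div by powers of two) that overwrite the bit windows [80,80+na) and [150,150+nb) in one step each, with na/nb obtained by clamping k_known.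
import Mathlib
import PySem

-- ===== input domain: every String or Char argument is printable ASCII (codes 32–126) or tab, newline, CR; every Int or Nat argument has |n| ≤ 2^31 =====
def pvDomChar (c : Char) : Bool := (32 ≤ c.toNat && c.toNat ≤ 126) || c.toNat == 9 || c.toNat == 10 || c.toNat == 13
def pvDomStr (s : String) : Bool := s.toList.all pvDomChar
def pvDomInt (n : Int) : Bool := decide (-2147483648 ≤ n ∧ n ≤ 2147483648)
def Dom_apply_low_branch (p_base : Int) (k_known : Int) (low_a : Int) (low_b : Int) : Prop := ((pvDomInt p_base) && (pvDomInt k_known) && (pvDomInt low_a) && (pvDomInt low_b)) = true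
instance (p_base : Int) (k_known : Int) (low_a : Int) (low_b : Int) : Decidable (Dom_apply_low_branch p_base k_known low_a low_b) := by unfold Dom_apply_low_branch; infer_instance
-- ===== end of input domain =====

-- B replaces A's two per-bit set/clear loops by closed-form arithmetic splices (mod/div by
-- powers of two) that overwrite the bit windows [80,80+na) and [150,150+nb) in one step each.


-- ===== PORT A =====
-- the loop body shared by A's two loops: set/clear bit (s+b) of p_low according to bit b of v
def pvBody (k_known : Int) (v : Int) (s : Int) (p_low : Int) (b : Int) : Int :=
  let idx := s + b
  if idx < k_known then
    if PySem.Int.band (v >>> b.toNat) 1 ≠ 0 then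
      PySem.Int.bor p_low ((1 : Int) <<< idx.toNat)
    else
      PySem.Int.band p_low (Int.not ((1 : Int) <<< idx.toNat))
  else p_low

def apply_low_branch (p_base : Int) (k_known : Int) (low_a : Int) (low_b : Int) : Int :=
  let p_low := PySem.Int.band p_base (((1 : Int) <<< k_known.toNat) - 1)
  let p_low := (PySem.List.pyRange 0 7 1).foldl (pvBody k_known low_a 80) p_low
  let p_low := (PySem.List.pyRange 0 6 1).foldl (pvBody k_known low_b 150) p_low
  p_low

-- ===== PORT B =====
-- replace bits [s, s+n) of p by the n lowest bits of v, arithmetically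
def pvSplice (p : Int) (s n : Nat) (v : Int) : Int :=
  PySem.Int.mod p ((1 : Int) <<< s) + PySem.Int.mod v ((1 : Int) <<< n) * ((1 : Int) <<< s) +
    PySem.Int.floordiv p ((1 : Int) <<< (s + n)) * ((1 : Int) <<< (s + n))

def apply_low_branch_alt (p_base : Int) (k_known : Int) (low_a : Int) (low_b : Int) : Int :=
  let p := PySem.Int.mod p_base ((1 : Int) <<< k_known.toNat)
  let na := max 0 (min 7 (k_known - 80))
  let nb := max 0 (min 6 (k_known - 150))
  pvSplice (pvSplice p 80 na.toNat low_a) 150 nb.toNat low_b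

-- ===== PRECONDITION & SPEC =====
-- A raises ValueError ("negative shift count") when k_known < 0; Pre_ excludes exactly that.
def Pre_apply_low_branch (p_base : Int) (k_known : Int) (low_a : Int) (low_b : Int) : Prop :=
  0 ≤ k_known
instance (p_base : Int) (k_known : Int) (low_a : Int) (low_b : Int) : Decidable (Pre_apply_low_branch p_base k_known low_a low_b) := by unfold Pre_apply_low_branch; infer_instance

def pvWitness_apply_low_branch : Int × Int × Int × Int := (12345, 90, 3, 1)

def Spec_apply_low_branch (p_base : Int) (k_known : Int) (low_a : Int) (low_b : Int) (out : Int) : Prop := out = apply_low_branch_alt p_base k_known low_a low_b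
instance (p_base : Int) (k_known : Int) (low_a : Int) (low_b : Int) (out : Int) : Decidable (Spec_apply_low_branch p_base k_known low_a low_b out) := by unfold Spec_apply_low_branch; infer_instance

-- ===== CLAIM (what is proved, stated in full; the proofs are below) =====
def Claim_equal_apply_low_branch : Prop := ∀ (p_base : Int) (k_known : Int) (low_a : Int) (low_b : Int), Dom_apply_low_branch p_base k_known low_a low_b → Pre_apply_low_branch p_base k_known low_a low_b → Spec_apply_low_branch p_base k_known low_a low_b (apply_low_branch p_base k_known low_a low_b)

-- ===== LEMMAS AND PROOFS =====

-- Nat-level theory: stepN sets bit i of p to v (v ≤ 1), spliceN replaces bits [s,s+n) by a's low bits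
def stepN (p i v : Nat) : Nat := p % 2 ^ i + v * 2 ^ i + p / 2 ^ (i + 1) * 2 ^ (i + 1)
def spliceN (p s n a : Nat) : Nat :=
  p % 2 ^ s + a % 2 ^ n * 2 ^ s + p / 2 ^ (s + n) * 2 ^ (s + n)

theorem spliceN_zero (p s a : Nat) : spliceN p s 0 a = p := by
  have h := Nat.div_add_mod p (2 ^ s)
  have h2 : 2 ^ s * (p / 2 ^ s) = p / 2 ^ s * 2 ^ s := Nat.mul_comm _ _
  simp only [spliceN, pow_zero, Nat.mod_one, Nat.zero_mul, Nat.add_zero]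
  omega

theorem spliceN_mod (p s n a : Nat) : spliceN p s n (a % 2 ^ n) = spliceN p s n a := by
  simp only [spliceN, Nat.mod_mod_of_dvd _ dvd_rfl]

theorem spliceN_small (p s n a : Nat) : p % 2 ^ s + a % 2 ^ n * 2 ^ s < 2 ^ (s + n) := by
  have hl : p % 2 ^ s < 2 ^ s := Nat.mod_lt _ (Nat.two_pow_pos s)
  have hm : a % 2 ^ n < 2 ^ n := Nat.mod_lt _ (Nat.two_pow_pos n)
  have hpow : (2:Nat) ^ (s + n) = 2 ^ s * 2 ^ n := pow_add 2 s n
  nlinarith [hl, hm, Nat.two_pow_pos s, Nat.two_pow_pos n]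

theorem spliceN_succ (p s n a : Nat) :
    stepN (spliceN p s n a) (s + n) (a / 2 ^ n % 2) = spliceN p s (n + 1) a := by
  have hsmall := spliceN_small p s n a
  have hqmod : spliceN p s n a % 2 ^ (s + n) = p % 2 ^ s + a % 2 ^ n * 2 ^ s := by
    unfold spliceN
    rw [Nat.add_mul_mod_self_right, Nat.mod_eq_of_lt hsmall]
  have hqdiv : spliceN p s n a / 2 ^ (s + n) = p / 2 ^ (s + n) := by
    unfold spliceN
    rw [Nat.add_mul_div_right _ _ (Nat.two_pow_pos (s + n)), Nat.div_eq_of_lt hsmall]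
    omega
  have hq2 : spliceN p s n a / 2 ^ (s + n + 1) = p / 2 ^ (s + n + 1) := by
    have e : (2:Nat) ^ (s + n + 1) = 2 ^ (s + n) * 2 := pow_succ 2 (s + n)
    rw [e, ← Nat.div_div_eq_div_mul, hqdiv, Nat.div_div_eq_div_mul, ← e]
  have hamod : a % 2 ^ (n + 1) = a % 2 ^ n + 2 ^ n * (a / 2 ^ n % 2) := by
    rw [pow_succ]; exact Nat.mod_mul
  show spliceN p s n a % 2 ^ (s + n) + a / 2 ^ n % 2 * 2 ^ (s + n)
      + spliceN p s n a / 2 ^ (s + n + 1) * 2 ^ (s + n + 1)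
    = p % 2 ^ s + a % 2 ^ (n + 1) * 2 ^ s + p / 2 ^ (s + n + 1) * 2 ^ (s + n + 1)
  rw [hqmod, hq2, hamod, pow_add 2 s n]
  ring

theorem testBit_stepN_lt (p i v j : Nat) (hj : j < i) : (stepN p i v).testBit j = p.testBit j := by
  have hstep : stepN p i v = p % 2 ^ i + (v + 2 * (p / 2 ^ (i + 1))) * 2 ^ i := by
    unfold stepN; rw [pow_succ]; ring
  have hmod : stepN p i v % 2 ^ i = p % 2 ^ i := by
    rw [hstep, Nat.add_mul_mod_self_right, Nat.mod_mod_of_dvd _ dvd_rfl]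
  have h1 := Nat.testBit_mod_two_pow (stepN p i v) i j
  have h2 := Nat.testBit_mod_two_pow p i j
  simp only [hj, decide_true, Bool.true_and] at h1 h2
  rw [← h1, hmod, h2]

theorem testBit_stepN_self (p i v : Nat) (hv : v ≤ 1) :
    (stepN p i v).testBit i = decide (v = 1) := by
  rw [Nat.testBit_eq_decide_div_mod_eq]
  have hdiv : stepN p i v / 2 ^ i = v + 2 * (p / 2 ^ (i + 1)) := by
    have hstep : stepN p i v = p % 2 ^ i + (v + 2 * (p / 2 ^ (i + 1))) * 2 ^ i := by
      unfold stepN; rw [pow_succ]; ring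
    rw [hstep, Nat.add_mul_div_right _ _ (Nat.two_pow_pos i),
      Nat.div_eq_of_lt (Nat.mod_lt _ (Nat.two_pow_pos i))]
    omega
  rw [hdiv, decide_eq_decide]
  omega

theorem testBit_stepN_gt (p i v j : Nat) (hv : v ≤ 1) (hj : i < j) :
    (stepN p i v).testBit j = p.testBit j := by
  have hvm : v * 2 ^ i ≤ 2 ^ i := by
    have := Nat.mul_le_mul_right (2 ^ i) hv; simpa using this
  have hsmall : p % 2 ^ i + v * 2 ^ i < 2 ^ (i + 1) := by
    have h1 : p % 2 ^ i < 2 ^ i := Nat.mod_lt _ (Nat.two_pow_pos i)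
    have h2 : (2:Nat) ^ (i + 1) = 2 ^ i * 2 := pow_succ 2 i
    omega
  have hdiv : stepN p i v / 2 ^ (i + 1) = p / 2 ^ (i + 1) := by
    show (p % 2 ^ i + v * 2 ^ i + p / 2 ^ (i + 1) * 2 ^ (i + 1)) / 2 ^ (i + 1) = _
    rw [Nat.add_mul_div_right _ _ (Nat.two_pow_pos (i + 1)), Nat.div_eq_of_lt hsmall]
    omega
  have hj' : j = (j - (i + 1)) + (i + 1) := by omega
  rw [hj', ← Nat.testBit_div_two_pow, hdiv, Nat.testBit_div_two_pow]

theorem lor_two_pow (p i : Nat) : p ||| 2 ^ i = stepN p i 1 := by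
  apply Nat.eq_of_testBit_eq
  intro j
  rcases lt_trichotomy j i with h | h | h
  · rw [Nat.testBit_or, testBit_stepN_lt p i 1 j h,
      Nat.testBit_two_pow_of_ne (by omega), Bool.or_false]
  · subst h
    rw [Nat.testBit_or, testBit_stepN_self p j 1 le_rfl, Nat.testBit_two_pow]
    simp
  · rw [Nat.testBit_or, testBit_stepN_gt p i 1 j le_rfl h,
      Nat.testBit_two_pow_of_ne (by omega), Bool.or_false]

theorem sub_and_two_pow (p i : Nat) : p - (p &&& 2 ^ i) = stepN p i 0 := by
  rw [Nat.and_two_pow]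
  have h1 := Nat.div_add_mod p (2 ^ (i + 1))
  have h2 : p % 2 ^ (i + 1) = p % 2 ^ i + 2 ^ i * (p / 2 ^ i % 2) := by
    rw [pow_succ]; exact Nat.mod_mul
  have h3 : (p.testBit i).toNat = p / 2 ^ i % 2 := by
    rw [Nat.testBit_eq_decide_div_mod_eq]
    rcases (by omega : p / 2 ^ i % 2 = 0 ∨ p / 2 ^ i % 2 = 1) with h | h <;> simp [h]
  have h5 : 2 ^ (i + 1) * (p / 2 ^ (i + 1)) = p / 2 ^ (i + 1) * 2 ^ (i + 1) := Nat.mul_comm _ _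
  rw [h3]; unfold stepN
  rcases (by omega : p / 2 ^ i % 2 = 0 ∨ p / 2 ^ i % 2 = 1) with h | h <;>
    rw [h] at h2 ⊢ <;>
    simp only [Nat.zero_mul, Nat.mul_zero, Nat.add_zero, Nat.sub_zero, Nat.one_mul,
      Nat.mul_one] at h2 ⊢ <;>
    omega

-- Int-level bridges
theorem one_shiftLeft_nat (K : Nat) : ((1 : Int) <<< K) = ((2 ^ K : Nat) : Int) := by
  simp [Int.shiftLeft_eq]

theorem two_pow_cast (K : Nat) : ((2 : Int) ^ K) = ((2 ^ K : Nat) : Int) := by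
  push_cast; rfl

theorem shift_pow (K : Nat) : ((1 : Int) <<< K) = (2 : Int) ^ K := by
  rw [one_shiftLeft_nat, two_pow_cast]

theorem band_mask (x : Int) (K : Nat) :
    PySem.Int.band x (((1 : Int) <<< K) - 1) = PySem.Int.mod x ((2 : Int) ^ K) := by
  have h1 : (1:Nat) ≤ 2 ^ K := Nat.one_le_two_pow
  have hm : ((1 : Int) <<< K) - 1 = ((2 ^ K - 1 : Nat) : Int) := by
    rw [one_shiftLeft_nat]; push_cast [h1]; ring
  have hpos : (0:Int) < 2 ^ K := by positivity
  rw [hm, PySem.Int.mod_eq_emod_of_pos hpos]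
  by_cases hx : (0:Int) ≤ x
  · obtain ⟨m, rfl⟩ : ∃ m : Nat, x = (m : Int) := ⟨x.toNat, (Int.toNat_of_nonneg hx).symm⟩
    rw [PySem.Int.band_of_nonneg (by positivity) (Int.natCast_nonneg _),
      Int.toNat_natCast, Int.toNat_natCast, Nat.and_two_pow_sub_one_eq_mod, two_pow_cast]
    push_cast
    rfl
  · obtain ⟨m, rfl⟩ : ∃ m : Nat, x = Int.negSucc m := by
      refine ⟨(-x - 1).toNat, ?_⟩
      rw [Int.negSucc_eq]
      omega
    have hns : Int.negSucc m = -(m : Int) - 1 := by rw [Int.negSucc_eq]; ring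
    have hr : m % 2 ^ K < 2 ^ K := Nat.mod_lt _ (Nat.two_pow_pos K)
    have hL : PySem.Int.band (Int.negSucc m) ((2 ^ K - 1 : Nat) : Int)
        = ((2 ^ K - 1 - m % 2 ^ K : Nat) : Int) := by
      have hn1 : ¬ (0:Int) ≤ Int.negSucc m := not_le.mpr (Int.negSucc_lt_zero m)
      have hn2 : (0:Int) ≤ ((2 ^ K - 1 : Nat) : Int) := Int.natCast_nonneg _
      simp only [PySem.Int.band, hn1, hn2, if_true, if_false]
      have e1 : (-(Int.negSucc m) - 1).toNat = m := by rw [hns]; omega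
      rw [e1, Int.toNat_natCast, Nat.and_comm, Nat.and_two_pow_sub_one_eq_mod]
    rw [hL]
    have hsplit : Int.negSucc m
        = (((2 ^ K - 1 - m % 2 ^ K : Nat) : Int)) + (2:Int) ^ K * (-((m / 2 ^ K : Nat) : Int) - 1) := by
      have hmd := Nat.mod_add_div m (2 ^ K)
      rw [hns]
      push_cast [show m % 2 ^ K ≤ 2 ^ K - 1 by omega, h1]
      have hmd' : ((m % 2 ^ K : Nat) : Int) + ((2 ^ K : Nat) : Int) * ((m / 2 ^ K : Nat) : Int)
          = (m : Int) := by exact_mod_cast hmd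
      push_cast at hmd'
      linear_combination hmd'
    rw [hsplit, Int.add_mul_emod_self_left,
      Int.emod_eq_of_lt (Int.natCast_nonneg _) (by
        rw [two_pow_cast]; exact_mod_cast (by omega : 2 ^ K - 1 - m % 2 ^ K < 2 ^ K))]

theorem int_step (P i t : Nat) (ht : t ≤ 1) :
    (if ((t : Nat) : Int) ≠ 0 then PySem.Int.bor (P : Int) ((1 : Int) <<< i)
     else PySem.Int.band (P : Int) (Int.not ((1 : Int) <<< i)))
    = ((stepN P i t : Nat) : Int) := by
  rcases (by omega : t = 0 ∨ t = 1) with rfl | rfl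
  · rw [if_neg (by simp)]
    have hnot : Int.not ((1 : Int) <<< i) = Int.negSucc (2 ^ i) := by
      rw [one_shiftLeft_nat]; rfl
    rw [hnot]
    have hn1 : ¬ (0:Int) ≤ Int.negSucc (2 ^ i) := not_le.mpr (Int.negSucc_lt_zero _)
    have hn0 : (0:Int) ≤ (P : Int) := Int.natCast_nonneg _
    simp only [PySem.Int.band, hn0, hn1, if_true, if_false]
    have e1 : (-(Int.negSucc (2 ^ i)) - 1).toNat = 2 ^ i := by
      rw [Int.negSucc_eq]
      have := Nat.two_pow_pos i
      omega
    rw [e1, Int.toNat_natCast, sub_and_two_pow]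
  · rw [if_pos (by simp), one_shiftLeft_nat,
      PySem.Int.bor_of_nonneg (Int.natCast_nonneg _) (Int.natCast_nonneg _),
      Int.toNat_natCast, Int.toNat_natCast, lor_two_pow]

theorem bit_extract (la : Int) (n b : Nat) (h : b < n) :
    PySem.Int.band (la >>> b) 1
      = (((PySem.Int.mod la ((2 : Int) ^ n)).toNat / 2 ^ b % 2 : Nat) : Int) := by
  have hpow : (0:Int) < 2 ^ n := by positivity
  have hM0 : 0 ≤ PySem.Int.mod la ((2:Int) ^ n) := PySem.Int.mod_nonneg la hpow
  obtain ⟨M, hM⟩ : ∃ M : Nat, PySem.Int.mod la ((2:Int) ^ n) = (M : Int) :=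
    ⟨_, (Int.toNat_of_nonneg hM0).symm⟩
  have hdecomp : PySem.Int.floordiv la ((2:Int) ^ n) * 2 ^ n + (M : Int) = la := by
    rw [← hM]; exact PySem.Int.floordiv_mul_add_mod la _
  set q := PySem.Int.floordiv la ((2:Int) ^ n) with hq
  have hpows : ((2:Int)) ^ n = 2 ^ (n - b - 1) * 2 * 2 ^ b := by
    rw [mul_assoc, ← pow_succ', ← pow_add]
    congr 1
    omega
  have hla : la = (M : Int) + (q * (2 ^ (n - b - 1) * 2)) * (((2 ^ b : Nat)) : Int) := by
    rw [← two_pow_cast b, ← hdecomp, hpows]; ring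
  rw [PySem.Int.band_one, Int.shiftRight_eq_div_pow,
    PySem.Int.mod_eq_emod_of_pos (by omega), hM, Int.toNat_natCast]
  rw [hla, Int.add_mul_ediv_right _ _ (by positivity : (((2 ^ b : Nat)) : Int) ≠ 0)]
  have hMd : (M : Int) / (((2 ^ b : Nat)) : Int) = ((M / 2 ^ b : Nat) : Int) := by
    push_cast; rfl
  rw [hMd]
  have hshape : ((M / 2 ^ b : Nat) : Int) + q * (2 ^ (n - b - 1) * 2)
      = ((M / 2 ^ b : Nat) : Int) + 2 * (q * 2 ^ (n - b - 1)) := by ring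
  rw [hshape, Int.add_mul_emod_self_left]
  push_cast
  rfl

theorem pvSplice_natCast (P : Nat) (s n : Nat) (v : Int) :
    pvSplice (P : Int) s n v
      = ((spliceN P s n (PySem.Int.mod v ((2 : Int) ^ n)).toNat : Nat) : Int) := by
  have hpow : (0:Int) < 2 ^ n := by positivity
  have hM0 : 0 ≤ PySem.Int.mod v ((2:Int) ^ n) := PySem.Int.mod_nonneg v hpow
  have hMlt : PySem.Int.mod v ((2:Int) ^ n) < 2 ^ n := PySem.Int.mod_lt v hpow
  obtain ⟨Mv, hMv⟩ : ∃ Mv : Nat, PySem.Int.mod v ((2:Int) ^ n) = (Mv : Int) :=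
    ⟨_, (Int.toNat_of_nonneg hM0).symm⟩
  have hMn : Mv % 2 ^ n = Mv := by
    apply Nat.mod_eq_of_lt
    rw [hMv, two_pow_cast] at hMlt
    exact_mod_cast hMlt
  unfold pvSplice spliceN
  simp only [shift_pow]
  rw [two_pow_cast s, two_pow_cast (s + n), PySem.Int.mod_natCast, PySem.Int.floordiv_natCast,
    hMv, Int.toNat_natCast, hMn]
  push_cast
  ring

theorem pvBody_skip (k v s : Int) (c : Nat) (X : Int) (hge : ¬ s + (c : Int) < k) :
    pvBody k v s X (c : Int) = X := by
  simp only [pvBody, if_neg hge]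

theorem pvBody_eq (k v s : Int) (hs : 0 ≤ s) (c n : Nat) (hcn : c < n) (Q : Nat)
    (hlt : s + (c : Int) < k) :
    pvBody k v s (Q : Int) (c : Int)
      = ((stepN Q (s.toNat + c) ((PySem.Int.mod v ((2 : Int) ^ n)).toNat / 2 ^ c % 2) : Nat) : Int) := by
  have h1 : (s + (c : Int)).toNat = s.toNat + c := by omega
  have h2 : ((c : Int)).toNat = c := Int.toNat_natCast c
  simp only [pvBody, if_pos hlt, h1, h2]
  rw [bit_extract v n c hcn]
  exact int_step Q (s.toNat + c) _ (by omega)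

-- the generic loop lemma: A's guarded per-bit loop equals one splice
theorem loop_eq_splice (cnt : Nat) (s : Int) (hs : 0 ≤ s) (k v : Int) (P : Nat) :
    (PySem.List.pyRange 0 (cnt : Int) 1).foldl (pvBody k v s) (P : Int)
      = ((spliceN P s.toNat (max 0 (min (cnt : Int) (k - s))).toNat
            (PySem.Int.mod v ((2 : Int) ^ (max 0 (min (cnt : Int) (k - s))).toNat)).toNat : Nat) : Int) := by
  induction cnt with
  | zero =>
      have h0 : (max 0 (min ((0:Nat) : Int) (k - s))).toNat = 0 := by omega
      rw [h0]
      have he : PySem.List.pyRange 0 ((0:Nat) : Int) 1 = [] := by decide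
      rw [he, spliceN_zero]
      rfl
  | succ c ih =>
      have hcast : ((c + 1 : Nat) : Int) = (c : Int) + 1 := by push_cast; ring
      rw [hcast, PySem.List.pyRange_one_succ_right (Int.natCast_nonneg c), List.foldl_append,
        ih]
      simp only [List.foldl_cons, List.foldl_nil]
      by_cases hlt : s + (c : Int) < k
      · have hNold : (max 0 (min (c : Int) (k - s))).toNat = c := by omega
        have hNnew : (max 0 (min ((c : Int) + 1) (k - s))).toNat = c + 1 := by omega
        rw [hNold, hNnew, pvBody_eq k v s hs c (c + 1) (by omega) _ hlt]
        have hMM : (PySem.Int.mod v ((2:Int) ^ c)).toNat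
            = (PySem.Int.mod v ((2:Int) ^ (c + 1))).toNat % 2 ^ c := by
          have ha : PySem.Int.mod v ((2:Int) ^ c) = v % 2 ^ c :=
            PySem.Int.mod_eq_emod_of_pos (by positivity)
          have hb : PySem.Int.mod v ((2:Int) ^ (c + 1)) = v % 2 ^ (c + 1) :=
            PySem.Int.mod_eq_emod_of_pos (by positivity)
          have hd : v % (2:Int) ^ (c + 1) % 2 ^ c = v % 2 ^ c :=
            Int.emod_emod_of_dvd v (pow_dvd_pow 2 (by omega))
          obtain ⟨Mf, hMf⟩ : ∃ Mf : Nat, v % (2:Int) ^ (c + 1) = (Mf : Int) :=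
            ⟨_, (Int.toNat_of_nonneg (Int.emod_nonneg v (by positivity))).symm⟩
          rw [ha, hb, hMf, Int.toNat_natCast, ← hd, hMf, two_pow_cast c,
            ← Int.natCast_mod, Int.toNat_natCast]
        rw [hMM, spliceN_mod]
        exact_mod_cast congrArg (fun z : Nat => (z : Int)) (spliceN_succ P s.toNat c _)
      · rw [pvBody_skip k v s c _ hlt]
        have heq : (max 0 (min ((c : Int) + 1) (k - s))).toNat
            = (max 0 (min (c : Int) (k - s))).toNat := by omega
        rw [heq]

-- ===== VERDICT (by name: the statement is the Claim_ definition above) =====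
theorem apply_low_branch_spec : Claim_equal_apply_low_branch := by
  intro p_base k_known low_a low_b hDom hPre
  have hk : (0:Int) ≤ k_known := hPre
  unfold Spec_apply_low_branch
  simp only [apply_low_branch, apply_low_branch_alt]
  rw [band_mask]
  simp only [shift_pow]
  obtain ⟨P0, hP0⟩ : ∃ P0 : Nat, PySem.Int.mod p_base ((2:Int) ^ k_known.toNat) = (P0 : Int) :=
    ⟨_, (Int.toNat_of_nonneg (PySem.Int.mod_nonneg p_base (by positivity))).symm⟩
  rw [hP0]
  have l1 := loop_eq_splice 7 80 (by norm_num) k_known low_a P0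
  rw [show ((7:Nat) : Int) = (7:Int) by norm_num, show ((80:Int)).toNat = 80 from rfl] at l1
  rw [l1]
  have l2 := loop_eq_splice 6 150 (by norm_num) k_known low_b
    (spliceN P0 80 (max 0 (min (7:Int) (k_known - 80))).toNat
      (PySem.Int.mod low_a ((2:Int) ^ (max 0 (min (7:Int) (k_known - 80))).toNat)).toNat)
  rw [show ((6:Nat) : Int) = (6:Int) by norm_num, show ((150:Int)).toNat = 150 from rfl] at l2
  rw [l2, pvSplice_natCast, pvSplice_natCast]
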